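-- pv_equiv track=rewrite | github.com/Aakash326/Sales_forge_IBM | src/agents/document_intelligence_agent.py | _categorize_documents
-- ===== SOURCE A (Python) =====
-- from typing import Dict, List, Optional, Any, Tuple, Union
--
-- def _categorize_documents(documents: List[Dict[str, Any]]) -> Dict[str, List[Dict[str, Any]]]:
--     """Categorize documents by type for targeted analysis"""
--     categories = {
--         "financial": [],
--         "contracts": [],
--         "presentations": [],
--         "technical": [],
--         "strategic": []
--     }
--
--     for doc in documents:
--         doc_type = doc.get("type", "").lower()
--         content = doc.get("content", "").lower()
--
--         # Categorize by explicit type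
--         if doc_type in ["financial_report", "financial"]:
--             categories["financial"].append(doc)
--         elif doc_type in ["contract", "agreement"]:
--             categories["contracts"].append(doc)
--         elif doc_type in ["board_presentation", "presentation", "deck"]:
--             categories["presentations"].append(doc)
--         elif doc_type in ["technical_spec", "technical", "requirements"]:
--             categories["technical"].append(doc)
--         elif doc_type in ["strategic_plan", "strategy"]:
--             categories["strategic"].append(doc)
--         else:
--             # Auto-categorize based on content
--             if any(keyword in content for keyword in ["revenue", "financial", "earnings", "cash flow"]):
--                 categories["financial"].append(doc)
--             elif any(keyword in content for keyword in ["contract", "agreement", "terms", "sla"]):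
--                 categories["contracts"].append(doc)
--             elif any(keyword in content for keyword in ["board", "executive", "presentation", "strategic"]):
--                 categories["presentations"].append(doc)
--             elif any(keyword in content for keyword in ["api", "technical", "architecture", "requirements"]):
--                 categories["technical"].append(doc)
--             else:
--                 categories["strategic"].append(doc)
--
--     return categories
-- ===== SOURCE B (Python) =====
-- TYPE_MAP = {
--     "financial_report": "financial", "financial": "financial",
--     "contract": "contracts", "agreement": "contracts",
--     "board_presentation": "presentations", "presentation": "presentations", "deck": "presentations",
--     "technical_spec": "technical", "technical": "technical", "requirements": "technical",
--     "strategic_plan": "strategic", "strategy": "strategic",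
-- }
--
-- CONTENT_RULES = [
--     ("financial", ["revenue", "financial", "earnings", "cash flow"]),
--     ("contracts", ["contract", "agreement", "terms", "sla"]),
--     ("presentations", ["board", "executive", "presentation", "strategic"]),
--     ("technical", ["api", "technical", "architecture", "requirements"]),
-- ]
--
-- BUCKETS = ("financial", "contracts", "presentations", "technical", "strategic")
--
--
-- def _bucket(doc):
--     doc_type = doc.get("type", "").lower()
--     if doc_type in TYPE_MAP:
--         return TYPE_MAP[doc_type]
--     content = doc.get("content", "").lower()
--     for bucket, keywords in CONTENT_RULES:
--         if any(k in content for k in keywords):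
--             return bucket
--     return "strategic"
--
--
-- def _categorize_documents(documents):
--     return {b: [d for d in documents if _bucket(d) == b] for b in BUCKETS}
-- ===== Notes on version B (the rewrite author's own statement) =====
-- stated objective: idiomatic
-- what changed: Replaced A's single mutating pass of if/elif chains with a static type->bucket table plus an ordered content-rule list feeding one pure classifier, and the result is built declaratively as one filter per bucket instead of in-place appends.
import Mathlib
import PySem

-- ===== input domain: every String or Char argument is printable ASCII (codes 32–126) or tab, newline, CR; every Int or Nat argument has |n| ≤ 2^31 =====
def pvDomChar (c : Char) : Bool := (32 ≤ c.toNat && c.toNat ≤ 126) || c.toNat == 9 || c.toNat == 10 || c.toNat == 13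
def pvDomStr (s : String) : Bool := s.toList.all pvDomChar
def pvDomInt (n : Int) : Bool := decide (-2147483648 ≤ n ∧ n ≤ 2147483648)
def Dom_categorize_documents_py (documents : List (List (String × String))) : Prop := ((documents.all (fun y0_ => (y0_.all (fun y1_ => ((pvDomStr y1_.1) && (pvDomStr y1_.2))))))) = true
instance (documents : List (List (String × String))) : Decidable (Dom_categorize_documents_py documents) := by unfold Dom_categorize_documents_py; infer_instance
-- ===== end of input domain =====

-- B replaces A's single mutating pass of if/elif chains with a type table + ordered content-rule
-- list feeding one pure classifier, and builds each bucket as a filter (objective: idiomatic, not faster).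

-- ===== PORT A =====
-- A's loop body, transliterated branch for branch (Dict.modify k [] (· ++ [doc]) = categories[k].append(doc)).
def pvStepA (categories : PySem.Dict String (List (List (String × String)))) (doc : List (String × String)) :
    PySem.Dict String (List (List (String × String))) :=
  let doc_type := PySem.Str.lower ((PySem.Dict.mk doc).getD "type" "")
  let content := PySem.Str.lower ((PySem.Dict.mk doc).getD "content" "")
  if doc_type ∈ ["financial_report", "financial"] then
    categories.modify "financial" [] (· ++ [doc])
  else if doc_type ∈ ["contract", "agreement"] then
    categories.modify "contracts" [] (· ++ [doc])
  else if doc_type ∈ ["board_presentation", "presentation", "deck"] then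
    categories.modify "presentations" [] (· ++ [doc])
  else if doc_type ∈ ["technical_spec", "technical", "requirements"] then
    categories.modify "technical" [] (· ++ [doc])
  else if doc_type ∈ ["strategic_plan", "strategy"] then
    categories.modify "strategic" [] (· ++ [doc])
  else
    if ["revenue", "financial", "earnings", "cash flow"].any (fun k => PySem.Str.isIn k content) then
      categories.modify "financial" [] (· ++ [doc])
    else if ["contract", "agreement", "terms", "sla"].any (fun k => PySem.Str.isIn k content) then
      categories.modify "contracts" [] (· ++ [doc])
    else if ["board", "executive", "presentation", "strategic"].any (fun k => PySem.Str.isIn k content) then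
      categories.modify "presentations" [] (· ++ [doc])
    else if ["api", "technical", "architecture", "requirements"].any (fun k => PySem.Str.isIn k content) then
      categories.modify "technical" [] (· ++ [doc])
    else
      categories.modify "strategic" [] (· ++ [doc])

def categorize_documents_py (documents : List (List (String × String))) : List (String × List (List (String × String))) :=
  let categories : PySem.Dict String (List (List (String × String))) :=
    PySem.Dict.mk [("financial", []), ("contracts", []), ("presentations", []), ("technical", []), ("strategic", [])]
  (documents.foldl pvStepA categories).items

-- ===== PORT B =====
def pvTypeMap : PySem.Dict String String :=
  PySem.Dict.mk
    [("financial_report", "financial"), ("financial", "financial"),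
     ("contract", "contracts"), ("agreement", "contracts"),
     ("board_presentation", "presentations"), ("presentation", "presentations"), ("deck", "presentations"),
     ("technical_spec", "technical"), ("technical", "technical"), ("requirements", "technical"),
     ("strategic_plan", "strategic"), ("strategy", "strategic")]

def pvContentRules : List (String × List String) :=
  [("financial", ["revenue", "financial", "earnings", "cash flow"]),
   ("contracts", ["contract", "agreement", "terms", "sla"]),
   ("presentations", ["board", "executive", "presentation", "strategic"]),
   ("technical", ["api", "technical", "architecture", "requirements"])]

def pvBuckets : List String := ["financial", "contracts", "presentations", "technical", "strategic"]

def pvBucket (doc : List (String × String)) : String :=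
  let doc_type := PySem.Str.lower ((PySem.Dict.mk doc).getD "type" "")
  match pvTypeMap.get? doc_type with
  | some b => b
  | none =>
    let content := PySem.Str.lower ((PySem.Dict.mk doc).getD "content" "")
    match pvContentRules.find? (fun r => r.2.any (fun k => PySem.Str.isIn k content)) with
    | some r => r.1
    | none => "strategic"

def categorize_documents_py_alt (documents : List (List (String × String))) : List (String × List (List (String × String))) :=
  pvBuckets.map (fun b => (b, documents.filter (fun d => pvBucket d == b)))

-- ===== PRECONDITION & SPEC =====
def Spec_categorize_documents_py (documents : List (List (String × String))) (out : List (String × List (List (String × String)))) : Prop := out = categorize_documents_py_alt documents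
instance (documents : List (List (String × String))) (out : List (String × List (List (String × String)))) : Decidable (Spec_categorize_documents_py documents out) := by unfold Spec_categorize_documents_py; infer_instance

-- ===== CLAIM (what is proved, stated in full; the proofs are below) =====
def Claim_equal_categorize_documents_py : Prop := ∀ (documents : List (List (String × String))), Dom_categorize_documents_py documents → Spec_categorize_documents_py documents (categorize_documents_py documents)

-- ===== LEMMAS AND PROOFS =====

-- the key A's if/elif chain selects, as a function of the lowered type and content strings
def pvKeyA (t c : String) : String :=
  if t ∈ ["financial_report", "financial"] then "financial"
  else if t ∈ ["contract", "agreement"] then "contracts"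
  else if t ∈ ["board_presentation", "presentation", "deck"] then "presentations"
  else if t ∈ ["technical_spec", "technical", "requirements"] then "technical"
  else if t ∈ ["strategic_plan", "strategy"] then "strategic"
  else
    if ["revenue", "financial", "earnings", "cash flow"].any (fun k => PySem.Str.isIn k c) then "financial"
    else if ["contract", "agreement", "terms", "sla"].any (fun k => PySem.Str.isIn k c) then "contracts"
    else if ["board", "executive", "presentation", "strategic"].any (fun k => PySem.Str.isIn k c) then "presentations"
    else if ["api", "technical", "architecture", "requirements"].any (fun k => PySem.Str.isIn k c) then "technical"
    else "strategic"

theorem pv_typeMap_none (t : String)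
    (n1 : t ≠ "financial_report") (n2 : t ≠ "financial") (n3 : t ≠ "contract") (n4 : t ≠ "agreement")
    (n5 : t ≠ "board_presentation") (n6 : t ≠ "presentation") (n7 : t ≠ "deck") (n8 : t ≠ "technical_spec")
    (n9 : t ≠ "technical") (n10 : t ≠ "requirements") (n11 : t ≠ "strategic_plan") (n12 : t ≠ "strategy") :
    pvTypeMap.get? t = none := by
  have e1 : ("financial_report" == t) = false := beq_eq_false_iff_ne.mpr (Ne.symm n1)
  have e2 : ("financial" == t) = false := beq_eq_false_iff_ne.mpr (Ne.symm n2)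
  have e3 : ("contract" == t) = false := beq_eq_false_iff_ne.mpr (Ne.symm n3)
  have e4 : ("agreement" == t) = false := beq_eq_false_iff_ne.mpr (Ne.symm n4)
  have e5 : ("board_presentation" == t) = false := beq_eq_false_iff_ne.mpr (Ne.symm n5)
  have e6 : ("presentation" == t) = false := beq_eq_false_iff_ne.mpr (Ne.symm n6)
  have e7 : ("deck" == t) = false := beq_eq_false_iff_ne.mpr (Ne.symm n7)
  have e8 : ("technical_spec" == t) = false := beq_eq_false_iff_ne.mpr (Ne.symm n8)
  have e9 : ("technical" == t) = false := beq_eq_false_iff_ne.mpr (Ne.symm n9)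
  have e10 : ("requirements" == t) = false := beq_eq_false_iff_ne.mpr (Ne.symm n10)
  have e11 : ("strategic_plan" == t) = false := beq_eq_false_iff_ne.mpr (Ne.symm n11)
  have e12 : ("strategy" == t) = false := beq_eq_false_iff_ne.mpr (Ne.symm n12)
  simp only [pvTypeMap, PySem.Dict.get?, List.find?, e1, e2, e3, e4, e5, e6, e7, e8, e9, e10, e11, e12]
  rfl

theorem pv_key_eq (t c : String) :
    pvKeyA t c =
      (match pvTypeMap.get? t with
       | some b => b
       | none =>
         match pvContentRules.find? (fun r => r.2.any (fun k => PySem.Str.isIn k c)) with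
         | some r => r.1
         | none => "strategic") := by
  unfold pvKeyA
  simp only [List.mem_cons, List.not_mem_nil, or_false]
  split_ifs with h1 h2 h3 h4 h5 g1 g2 g3 g4
  · rcases h1 with h | h <;> subst h <;> rfl
  · rcases h2 with h | h <;> subst h <;> rfl
  · rcases h3 with h | h | h <;> subst h <;> rfl
  · rcases h4 with h | h | h <;> subst h <;> rfl
  · rcases h5 with h | h <;> subst h <;> rfl
  all_goals (
    push Not at h1 h2 h3 h4 h5
    obtain ⟨n1, n2⟩ := h1
    obtain ⟨n3, n4⟩ := h2
    obtain ⟨n5, n6, n7⟩ := h3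
    obtain ⟨n8, n9, n10⟩ := h4
    obtain ⟨n11, n12⟩ := h5
    rw [pv_typeMap_none t n1 n2 n3 n4 n5 n6 n7 n8 n9 n10 n11 n12]
    simp only [pvContentRules, List.find?])
  · simp only [g1]
  · rw [Bool.not_eq_true] at g1
    simp only [g1, g2]
  · rw [Bool.not_eq_true] at g1 g2
    simp only [g1, g2, g3]
  · rw [Bool.not_eq_true] at g1 g2 g3
    simp only [g1, g2, g3, g4]
  · rw [Bool.not_eq_true] at g1 g2 g3 g4
    simp only [g1, g2, g3, g4]

theorem pv_bucket_eq (doc : List (String × String)) :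
    pvBucket doc = pvKeyA (PySem.Str.lower ((PySem.Dict.mk doc).getD "type" ""))
                          (PySem.Str.lower ((PySem.Dict.mk doc).getD "content" "")) := by
  rw [pv_key_eq]; rfl

theorem pv_step_eq (d : PySem.Dict String (List (List (String × String)))) (doc : List (String × String)) :
    pvStepA d doc = d.modify (pvBucket doc) [] (· ++ [doc]) := by
  rw [pv_bucket_eq]
  unfold pvStepA pvKeyA
  dsimp only
  split_ifs <;> rfl

theorem pv_bucket_mem (doc : List (String × String)) : pvBucket doc ∈ pvBuckets := by
  rw [pv_bucket_eq]
  unfold pvKeyA pvBuckets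
  split_ifs <;> simp

theorem pv_fold_inv (docs : List (List (String × String)))
    (l1 l2 l3 l4 l5 : List (List (String × String))) :
    (docs.foldl pvStepA (PySem.Dict.mk
        [("financial", l1), ("contracts", l2), ("presentations", l3), ("technical", l4), ("strategic", l5)])).items
    = [("financial", l1 ++ docs.filter (fun d => pvBucket d == "financial")),
       ("contracts", l2 ++ docs.filter (fun d => pvBucket d == "contracts")),
       ("presentations", l3 ++ docs.filter (fun d => pvBucket d == "presentations")),
       ("technical", l4 ++ docs.filter (fun d => pvBucket d == "technical")),
       ("strategic", l5 ++ docs.filter (fun d => pvBucket d == "strategic"))] := by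
  induction docs generalizing l1 l2 l3 l4 l5 with
  | nil => simp
  | cons doc docs ih =>
    rw [List.foldl_cons, pv_step_eq]
    have hmem := pv_bucket_mem doc
    simp only [pvBuckets, List.mem_cons, List.not_mem_nil, or_false] at hmem
    rcases hmem with h | h | h | h | h
    · rw [h, show (PySem.Dict.mk [("financial", l1), ("contracts", l2), ("presentations", l3), ("technical", l4), ("strategic", l5)]).modify "financial" [] (· ++ [doc]) = PySem.Dict.mk [("financial", l1 ++ [doc]), ("contracts", l2), ("presentations", l3), ("technical", l4), ("strategic", l5)] from rfl, ih]
      simp [h]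
    · rw [h, show (PySem.Dict.mk [("financial", l1), ("contracts", l2), ("presentations", l3), ("technical", l4), ("strategic", l5)]).modify "contracts" [] (· ++ [doc]) = PySem.Dict.mk [("financial", l1), ("contracts", l2 ++ [doc]), ("presentations", l3), ("technical", l4), ("strategic", l5)] from rfl, ih]
      simp [h]
    · rw [h, show (PySem.Dict.mk [("financial", l1), ("contracts", l2), ("presentations", l3), ("technical", l4), ("strategic", l5)]).modify "presentations" [] (· ++ [doc]) = PySem.Dict.mk [("financial", l1), ("contracts", l2), ("presentations", l3 ++ [doc]), ("technical", l4), ("strategic", l5)] from rfl, ih]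
      simp [h]
    · rw [h, show (PySem.Dict.mk [("financial", l1), ("contracts", l2), ("presentations", l3), ("technical", l4), ("strategic", l5)]).modify "technical" [] (· ++ [doc]) = PySem.Dict.mk [("financial", l1), ("contracts", l2), ("presentations", l3), ("technical", l4 ++ [doc]), ("strategic", l5)] from rfl, ih]
      simp [h]
    · rw [h, show (PySem.Dict.mk [("financial", l1), ("contracts", l2), ("presentations", l3), ("technical", l4), ("strategic", l5)]).modify "strategic" [] (· ++ [doc]) = PySem.Dict.mk [("financial", l1), ("contracts", l2), ("presentations", l3), ("technical", l4), ("strategic", l5 ++ [doc])] from rfl, ih]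
      simp [h]

-- ===== VERDICT (by name: the statement is the Claim_ definition above) =====
theorem categorize_documents_py_spec : Claim_equal_categorize_documents_py := by
  unfold Claim_equal_categorize_documents_py Spec_categorize_documents_py
  intro documents _
  unfold categorize_documents_py categorize_documents_py_alt
  rw [pv_fold_inv]
  simp [pvBuckets]
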